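-- pv_equiv track=rewrite | github.com/qiyitang71/Random-Arena-Games | experiments/fpraas-reach.py | has_full_priority0_lasso
-- ===== SOURCE A (Python) =====
-- def has_full_priority0_lasso(vertices, edges):
--     """
--     Check if there is a lasso-like path starting from v0 such that
--     every vertex along the path and in the cycle has priority 0.
--     """
--     if "v0" not in vertices or vertices["v0"] != 0:
--         return False
--
--     stack = [("v0", [])]  # (current_vertex, path_from_v0)
--
--     while stack:
--         current, path = stack.pop()
--
--         if vertices.get(current, -1) != 0:
--             continue
--
--         # Cycle detection
--         if current in path:
--             # All vertices along path have already been checked for priority=0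
--             return True
--
--         new_path = path + [current]
--         for neighbor in edges.get(current, []):
--             stack.append((neighbor, new_path))
--
--     return False
-- ===== SOURCE B (Python) =====
-- def has_full_priority0_lasso(vertices, edges):
--     # Greatest-fixpoint pruning: start from all priority-0 vertices and repeatedly
--     # drop vertices with no priority-0 successor left; "v0" survives iff it has an
--     # infinite (hence lasso-shaped) all-priority-0 path.
--     X = {v for v, p in vertices.items() if p == 0}
--     while True:
--         Y = {v for v in X if any(w in X for w in edges.get(v, []))}
--         if Y == X:
--             break
--         X = Y
--     return "v0" in X
-- ===== Notes on version B (the rewrite author's own statement) =====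
-- stated objective: alternative
-- what changed: Replaces A's stack search over all repetition-free priority-0 paths by a greatest-fixpoint pruning loop: start from the set of priority-0 vertices and repeatedly discard vertices without a surviving priority-0 successor until the set stabilises; v0 has the lasso iff it survives. Pre_ only excludes association lists with duplicate vertex keys, which represent no Python dict.
import Mathlib
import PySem

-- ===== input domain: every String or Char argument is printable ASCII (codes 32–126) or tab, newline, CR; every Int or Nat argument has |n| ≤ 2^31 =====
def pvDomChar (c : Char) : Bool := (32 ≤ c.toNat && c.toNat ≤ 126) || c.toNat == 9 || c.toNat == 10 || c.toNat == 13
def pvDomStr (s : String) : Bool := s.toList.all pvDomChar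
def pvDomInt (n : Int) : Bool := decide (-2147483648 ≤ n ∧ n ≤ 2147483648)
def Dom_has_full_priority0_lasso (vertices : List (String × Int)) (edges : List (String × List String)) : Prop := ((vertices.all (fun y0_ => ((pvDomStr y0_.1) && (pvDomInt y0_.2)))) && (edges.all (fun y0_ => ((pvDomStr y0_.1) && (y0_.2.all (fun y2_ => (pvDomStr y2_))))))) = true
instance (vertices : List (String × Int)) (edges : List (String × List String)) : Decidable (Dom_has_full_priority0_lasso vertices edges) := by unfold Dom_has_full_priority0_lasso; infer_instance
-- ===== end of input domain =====

-- B replaces A's stack search over repetition-free priority-0 paths by a greatest-fixpoint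
-- pruning of the priority-0 vertex set (alternative algorithm; same measured cost).


-- ===== PORT A =====
-- termination measure helpers for A's while-stack loop
def pvK (edges : List (String × List String)) : Nat :=
  (edges.map (fun q => q.2.length)).foldr max 0

def pvD (vertices : List (String × Int)) (path : List String) : Nat :=
  ((PySem.Set.ofList (vertices.map Prod.fst)).filter (fun z => !(path.contains z))).length

def pvMu (vertices : List (String × Int)) (edges : List (String × List String))
    (st : List (String × List String)) : Nat :=
  (st.map (fun e => (pvK edges + 1) ^ pvD vertices e.2)).sum

theorem pvSuccLen_le (edges : List (String × List String)) (c : String) :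
    (PySem.Dict.getD (PySem.Dict.mk edges) c []).length ≤ pvK edges := by
  induction edges with
  | nil => simp [PySem.Dict.getD_eq_get?_getD, PySem.Dict.get?, pvK]
  | cons q rest ih =>
    rw [PySem.Dict.getD_eq_get?_getD, PySem.Dict.get?_mk_cons]
    rw [PySem.Dict.getD_eq_get?_getD] at ih
    by_cases h : q.1 == c
    · simp [h, pvK]
    · simp only [h]
      refine le_trans ih ?_
      simp [pvK, List.foldr_map]

theorem pvFilter_lt (L : List String) (c : String) (path : List String)
    (hc : c ∈ L) (hn : c ∉ path) :
    (L.filter (fun z => !((path ++ [c]).contains z))).length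
      < (L.filter (fun z => !(path.contains z))).length := by
  have hsplit : L.filter (fun z => !((path ++ [c]).contains z))
      = (L.filter (fun z => !(path.contains z))).filter (fun z => !((path ++ [c]).contains z)) := by
    rw [List.filter_filter]
    apply List.filter_congr
    intro z _
    by_cases hz : (path ++ [c]).contains z
    · simp; tauto
    · have hzp : ¬ path.contains z := by
        intro hp; exact hz (by simp_all)
      simp; tauto
  rw [hsplit]
  apply List.length_filter_lt_length_iff_exists.mpr
  refine ⟨c, ?_, ?_⟩
  · simp [List.mem_filter, hc, hn]
  · simp

theorem pvD_lt (vertices : List (String × Int)) (c : String) (path : List String)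
    (h0 : PySem.Dict.getD (PySem.Dict.mk vertices) c (-1) = 0) (hn : c ∉ path) :
    pvD vertices (path ++ [c]) < pvD vertices path := by
  have hc : c ∈ PySem.Set.ofList (vertices.map Prod.fst) := by
    rw [PySem.Set.mem_ofList]
    rw [PySem.Dict.getD_eq_get?_getD] at h0
    cases hg : PySem.Dict.get? (PySem.Dict.mk vertices) c with
    | none => rw [hg] at h0; simp at h0
    | some v =>
      have := PySem.Dict.mem_items_of_get?_eq_some (d := PySem.Dict.mk vertices) hg
      exact List.mem_map_of_mem this
  exact pvFilter_lt _ c path hc hn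

theorem pvMu_skip (vertices : List (String × Int)) (edges : List (String × List String))
    (c : String) (p : List String) (rest : List (String × List String)) :
    pvMu vertices edges rest < pvMu vertices edges ((c, p) :: rest) := by
  simp only [pvMu, List.map_cons, List.sum_cons]
  have : 0 < (pvK edges + 1) ^ pvD vertices p := pow_pos (by omega) _
  omega

theorem pvMu_push (vertices : List (String × Int)) (edges : List (String × List String))
    (c : String) (p : List String) (rest : List (String × List String))
    (h0 : PySem.Dict.getD (PySem.Dict.mk vertices) c (-1) = 0) (hn : c ∉ p) :
    pvMu vertices edges
      (((PySem.Dict.getD (PySem.Dict.mk edges) c []).map (fun n => (n, p ++ [c]))).reverse ++ rest)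
      < pvMu vertices edges ((c, p) :: rest) := by
  simp only [pvMu, List.map_append, List.sum_append, List.map_cons, List.sum_cons,
    List.map_reverse, List.sum_reverse, List.map_map]
  set K := pvK edges with hK
  set d := pvD vertices p with hd
  set d' := pvD vertices (p ++ [c]) with hd'
  have hdlt : d' < d := pvD_lt vertices c p h0 hn
  set nbrs := PySem.Dict.getD (PySem.Dict.mk edges) c [] with hnbrs
  have hlen : nbrs.length ≤ K := pvSuccLen_le edges c
  have hsum : (List.map ((fun e => (K + 1) ^ pvD vertices e.2) ∘ fun n : String => (n, p ++ [c])) nbrs).sum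
      = nbrs.length * (K + 1) ^ d' := by
    have : (fun e => (K + 1) ^ pvD vertices e.2) ∘ (fun n : String => (n, p ++ [c]))
        = fun _ => (K + 1) ^ d' := by funext n; simp [hd']
    rw [this, List.map_const', List.sum_replicate, smul_eq_mul]
  have h1 : (K + 1) ^ d' ≤ (K + 1) ^ (d - 1) := Nat.pow_le_pow_right (by omega) (by omega)
  have h2 : (K + 1) ^ d = (K + 1) * (K + 1) ^ (d - 1) := by
    rw [← pow_succ']
    congr 1
    omega
  have h3 : nbrs.length * (K + 1) ^ d' ≤ K * (K + 1) ^ (d - 1) :=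
    Nat.mul_le_mul hlen h1
  have h4 : 0 < (K + 1) ^ (d - 1) := pow_pos (by omega) _
  have h5 : K * (K + 1) ^ (d - 1) + (K + 1) ^ (d - 1) = (K + 1) * (K + 1) ^ (d - 1) := by ring
  rw [hsum, h2]
  omega

-- the while-stack loop of A (stack top at the head; Python's pop takes the last
-- pushed neighbour, hence the .reverse when the neighbour block is pushed)
def pvLoopA (vertices : List (String × Int)) (edges : List (String × List String)) :
    List (String × List String) → Bool
  | [] => false
  | (current, path) :: rest =>
      if _h1 : PySem.Dict.getD (PySem.Dict.mk vertices) current (-1) ≠ 0 then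
        pvLoopA vertices edges rest
      else if _h2 : current ∈ path then true
      else
        pvLoopA vertices edges
          (((PySem.Dict.getD (PySem.Dict.mk edges) current []).map
              (fun n => (n, path ++ [current]))).reverse ++ rest)
  termination_by st => pvMu vertices edges st
  decreasing_by
  · exact pvMu_skip vertices edges current path rest
  · exact pvMu_push vertices edges current path rest (by omega) _h2

def has_full_priority0_lasso (vertices : List (String × Int)) (edges : List (String × List String)) : Bool :=
  match PySem.Dict.get? (PySem.Dict.mk vertices) "v0" with
  | none => false
  | some p => if p ≠ 0 then false else pvLoopA vertices edges [("v0", [])]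

-- ===== PORT B =====
def pvZero (vertices : List (String × Int)) : List String :=
  (vertices.filter (fun q => q.2 == 0)).map Prod.fst

def pvStep (edges : List (String × List String)) (X : List String) : List String :=
  X.filter (fun v => (PySem.Dict.getD (PySem.Dict.mk edges) v []).any (fun w => X.contains w))

theorem pvStep_sublist (edges : List (String × List String)) (X : List String) :
    (pvStep edges X).Sublist X := List.filter_sublist

theorem pvLoopB_dec (edges : List (String × List String)) (X : PySem.Set String)
    (h : ¬ PySem.Set.equal (pvStep edges X) X = true) : (pvStep edges X).length < X.length := by
  have hsub := pvStep_sublist edges X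
  have hne : pvStep edges X ≠ X := by
    intro he
    exact h (by rw [he]; exact (PySem.Set.equal_iff _ _).mpr (fun _ => Iff.rfl))
  rcases Nat.lt_or_ge (pvStep edges X).length X.length with h' | h'
  · exact h'
  · exact absurd (hsub.eq_of_length (le_antisymm hsub.length_le h')) hne

-- B's while-loop: prune until the set no longer changes
def pvLoopB (edges : List (String × List String)) (X : PySem.Set String) : PySem.Set String :=
  if _h : PySem.Set.equal (pvStep edges X) X then X else pvLoopB edges (pvStep edges X)
  termination_by X.length
  decreasing_by exact pvLoopB_dec edges X _h

def has_full_priority0_lasso_alt (vertices : List (String × Int)) (edges : List (String × List String)) : Bool :=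
  (pvLoopB edges (PySem.Set.ofList (pvZero vertices))).contains "v0"

-- ===== PRECONDITION & SPEC =====
-- Pre_ excludes only association lists with a duplicated vertex key: such a list
-- represents no Python dict (A's argument `vertices` is a dict, whose keys are unique).
def Pre_has_full_priority0_lasso (vertices : List (String × Int)) (edges : List (String × List String)) : Prop :=
  (vertices.map Prod.fst).Nodup
instance (vertices : List (String × Int)) (edges : List (String × List String)) : Decidable (Pre_has_full_priority0_lasso vertices edges) := by unfold Pre_has_full_priority0_lasso; infer_instance

def pvWitness_has_full_priority0_lasso : (List (String × Int)) × (List (String × List String)) :=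
  ([("v0", 0), ("a", 0)], [("v0", ["a"]), ("a", ["v0"])])

def Spec_has_full_priority0_lasso (vertices : List (String × Int)) (edges : List (String × List String)) (out : Bool) : Prop := out = has_full_priority0_lasso_alt vertices edges
instance (vertices : List (String × Int)) (edges : List (String × List String)) (out : Bool) : Decidable (Spec_has_full_priority0_lasso vertices edges out) := by unfold Spec_has_full_priority0_lasso; infer_instance

-- ===== CLAIM (what is proved, stated in full; the proofs are below) =====
def Claim_equal_has_full_priority0_lasso : Prop := ∀ (vertices : List (String × Int)) (edges : List (String × List String)), Dom_has_full_priority0_lasso vertices edges → Pre_has_full_priority0_lasso vertices edges → Spec_has_full_priority0_lasso vertices edges (has_full_priority0_lasso vertices edges)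

-- ===== LEMMAS AND PROOFS =====

-- successor list of a vertex (shared accessor of both ports)
def pvSucc (edges : List (String × List String)) (c : String) : List String :=
  PySem.Dict.getD (PySem.Dict.mk edges) c []

-- the recursion tree of A's stack loop, as an inductive predicate on one stack entry
inductive pvGood (vertices : List (String × Int)) (edges : List (String × List String)) :
    String → List String → Prop
  | hit (v : String) (p : List String) :
      PySem.Dict.getD (PySem.Dict.mk vertices) v (-1) = 0 → v ∈ p → pvGood vertices edges v p
  | step (v : String) (p : List String) (w : String) :
      PySem.Dict.getD (PySem.Dict.mk vertices) v (-1) = 0 → v ∉ p → w ∈ pvSucc edges v →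
      pvGood vertices edges w (p ++ [v]) → pvGood vertices edges v p

-- `pvChain V E p v`: p is a priority-0 chain whose last element (if any) has an edge to v
inductive pvChain (vertices : List (String × Int)) (edges : List (String × List String)) :
    List String → String → Prop
  | nil (v : String) : pvChain vertices edges [] v
  | snoc (p : List String) (u v : String) :
      pvChain vertices edges p u → PySem.Dict.getD (PySem.Dict.mk vertices) u (-1) = 0 →
      v ∈ pvSucc edges u → pvChain vertices edges (p ++ [u]) v

-- "S is a post-fixpoint": every member has priority 0 and a successor inside S
def pvPost (vertices : List (String × Int)) (edges : List (String × List String))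
    (S : List String) : Prop :=
  ∀ x ∈ S, PySem.Dict.getD (PySem.Dict.mk vertices) x (-1) = 0 ∧ ∃ w ∈ pvSucc edges x, w ∈ S

theorem pvMem_step (edges : List (String × List String)) (X : List String) (v : String) :
    v ∈ pvStep edges X ↔ v ∈ X ∧ ∃ w ∈ pvSucc edges v, w ∈ X := by
  simp [pvStep, pvSucc, List.mem_filter]

theorem pvMem_zero_of (vertices : List (String × Int)) (v : String)
    (h : PySem.Dict.getD (PySem.Dict.mk vertices) v (-1) = 0) : v ∈ pvZero vertices := by
  rw [PySem.Dict.getD_eq_get?_getD] at h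
  cases hg : PySem.Dict.get? (PySem.Dict.mk vertices) v with
  | none => rw [hg] at h; simp at h
  | some t =>
    rw [hg] at h
    simp at h
    subst h
    have hm := PySem.Dict.mem_items_of_get?_eq_some (d := PySem.Dict.mk vertices) hg
    unfold pvZero
    refine List.mem_map.mpr ⟨(v, 0), List.mem_filter.mpr ⟨hm, by simp⟩, rfl⟩

theorem pvZero_of_mem (vertices : List (String × Int)) (v : String)
    (hnd : (vertices.map Prod.fst).Nodup) (h : v ∈ pvZero vertices) :
    PySem.Dict.getD (PySem.Dict.mk vertices) v (-1) = 0 := by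
  unfold pvZero at h
  obtain ⟨q, hq, hfst⟩ := List.mem_map.mp h
  have hq2 := List.mem_filter.mp hq
  have hq0 : q.2 = 0 := by simpa using hq2.2
  have hget : PySem.Dict.get? (PySem.Dict.mk vertices) v = some q.2 := by
    apply PySem.Dict.get?_of_mem_items
    · subst hfst; exact (by simpa using hq2.1)
    · simpa [PySem.Dict.keys] using hnd
  rw [PySem.Dict.getD_eq_get?_getD, hget, hq0]
  rfl

theorem pvLoopB_sublist (edges : List (String × List String)) (X : PySem.Set String) :
    (pvLoopB edges X).Sublist X := by
  fun_induction pvLoopB edges X with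
  | case1 X h => exact List.Sublist.refl X
  | case2 X h ih => exact ih.trans (pvStep_sublist edges X)

theorem pvLoopB_fix (edges : List (String × List String)) (X : PySem.Set String)
    (hnd : X.Nodup) : pvStep edges (pvLoopB edges X) = pvLoopB edges X := by
  fun_induction pvLoopB edges X with
  | case1 X h =>
    have hmem := (PySem.Set.equal_iff _ _).mp h
    have hperm : (pvStep edges X).Perm X :=
      (List.perm_ext_iff_of_nodup ((pvStep_sublist edges X).nodup hnd) hnd).mpr hmem
    exact (pvStep_sublist edges X).eq_of_length hperm.length_eq
  | case2 X h ih => exact ih ((pvStep_sublist edges X).nodup hnd)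

-- every post-fixpoint inside X survives B's pruning loop
theorem pvPost_le_loopB (vertices : List (String × Int)) (edges : List (String × List String))
    (S : List String) (hS : pvPost vertices edges S) (X : PySem.Set String)
    (hsub : ∀ v ∈ S, v ∈ X) : ∀ v ∈ S, v ∈ pvLoopB edges X := by
  fun_induction pvLoopB edges X with
  | case1 X h => exact hsub
  | case2 X h ih =>
    apply ih
    intro v hv
    obtain ⟨w, hw, hwS⟩ := (hS v hv).2
    exact (pvMem_step edges X v).mpr ⟨hsub v hv, w, hw, hsub w hwS⟩

-- a chain's members have priority 0 and a successor inside (p ++ [v])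
theorem pvChain_closed (vertices : List (String × Int)) (edges : List (String × List String))
    (p : List String) (v : String) (hc : pvChain vertices edges p v) :
    ∀ x ∈ p, PySem.Dict.getD (PySem.Dict.mk vertices) x (-1) = 0 ∧
      ∃ w ∈ pvSucc edges x, w ∈ p ++ [v] := by
  induction hc with
  | nil => simp
  | snoc p u v hc h0 hv ih =>
    intro x hx
    rcases List.mem_append.mp hx with hx | hx
    · obtain ⟨hx0, w, hw, hwm⟩ := ih x hx
      refine ⟨hx0, w, hw, ?_⟩
      rcases List.mem_append.mp hwm with h' | h'
      · simp [h']
      · simp at h'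
        simp [h']
    · simp at hx
      subst hx
      exact ⟨h0, v, hv, by simp⟩

-- soundness: a successful search entry yields a post-fixpoint containing the whole path
theorem pvGood_sound (vertices : List (String × Int)) (edges : List (String × List String)) :
    ∀ (v : String) (p : List String), pvGood vertices edges v p → pvChain vertices edges p v →
    ∃ S, pvPost vertices edges S ∧ ∀ x ∈ p ++ [v], x ∈ S := by
  intro v p hg
  induction hg with
  | hit v p h0 hvp =>
    intro hc
    refine ⟨p ++ [v], ?_, fun x hx => hx⟩
    intro x hx
    rcases List.mem_append.mp hx with hx' | hx'
    · exact pvChain_closed vertices edges p v hc x hx'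
    · simp at hx'
      subst hx'
      obtain ⟨_, w, hw, hwm⟩ := pvChain_closed vertices edges p x hc x hvp
      exact ⟨h0, w, hw, hwm⟩
  | step v p w h0 hvp hw hg ih =>
    intro hc
    obtain ⟨S, hpost, hcov⟩ := ih (pvChain.snoc p v w hc h0 hw)
    refine ⟨S, hpost, fun x hx => hcov x ?_⟩
    rcases List.mem_append.mp hx with hx' | hx'
    · exact List.mem_append.mpr (Or.inl (List.mem_append.mpr (Or.inl hx')))
    · exact List.mem_append.mpr (Or.inl (List.mem_append.mpr (Or.inr hx')))

-- completeness: every vertex of the final fixpoint admits a successful search entry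
theorem pvFix_good (vertices : List (String × Int)) (edges : List (String × List String))
    (hnd : (vertices.map Prod.fst).Nodup)
    (F : List String) (hfix : pvStep edges F = F)
    (hsub : ∀ x ∈ F, x ∈ pvZero vertices) :
    ∀ (p : List String) (v : String), v ∈ F → pvGood vertices edges v p := by
  suffices h : ∀ (n : Nat) (p : List String) (v : String),
      (F.filter (fun x => !(p.contains x))).length ≤ n → v ∈ F → pvGood vertices edges v p by
    intro p v hv
    exact h _ p v le_rfl hv
  intro n
  induction n with
  | zero =>
    intro p v hlen hv
    have hp0 := pvZero_of_mem vertices v hnd (hsub v hv)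
    have hvp : v ∈ p := by
      by_contra hvp
      have : v ∈ F.filter (fun x => !(p.contains x)) := by
        simp [List.mem_filter, hv, hvp]
      have := List.length_pos_of_mem this
      omega
    exact pvGood.hit v p hp0 hvp
  | succ n ih =>
    intro p v hlen hv
    have hp0 := pvZero_of_mem vertices v hnd (hsub v hv)
    by_cases hvp : v ∈ p
    · exact pvGood.hit v p hp0 hvp
    · have hv' : v ∈ pvStep edges F := by rw [hfix]; exact hv
      obtain ⟨_, w, hw, hwF⟩ := (pvMem_step edges F v).mp hv'
      have hlt := pvFilter_lt F v p hv hvp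
      exact pvGood.step v p w hp0 hvp hw (ih (p ++ [v]) w (by omega) hwF)

-- A's stack loop succeeds iff some stack entry is Good
theorem pvLoopA_iff (vertices : List (String × Int)) (edges : List (String × List String))
    (st : List (String × List String)) :
    pvLoopA vertices edges st = true ↔ ∃ e ∈ st, pvGood vertices edges e.1 e.2 := by
  fun_induction pvLoopA vertices edges st with
  | case1 => simp
  | case2 current path rest h1 ih =>
    rw [ih]
    constructor
    · rintro ⟨e, he, hg⟩
      exact ⟨e, List.mem_cons_of_mem _ he, hg⟩
    · rintro ⟨e, he, hg⟩
      rcases List.mem_cons.mp he with he' | he'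
      · exfalso
        subst he'
        cases hg with
        | hit _ _ h0 _ => exact h1 h0
        | step _ _ _ h0 _ _ _ => exact h1 h0
      · exact ⟨e, he', hg⟩
  | case3 current path rest h1 h2 =>
    simp only [true_iff]
    push Not at h1
    exact ⟨(current, path), List.mem_cons_self, pvGood.hit current path h1 h2⟩
  | case4 current path rest h1 h2 ih =>
    rw [ih]
    push Not at h1
    constructor
    · rintro ⟨e, he, hg⟩
      rcases List.mem_append.mp he with he' | he'
      · rw [List.mem_reverse] at he'
        obtain ⟨w, hw, hwe⟩ := List.mem_map.mp he'
        subst hwe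
        exact ⟨(current, path), List.mem_cons_self,
          pvGood.step current path w h1 h2 hw hg⟩
      · exact ⟨e, List.mem_cons_of_mem _ he', hg⟩
    · rintro ⟨e, he, hg⟩
      rcases List.mem_cons.mp he with he' | he'
      · subst he'
        cases hg with
        | hit _ _ _ hvp => exact absurd hvp h2
        | step _ _ w _ _ hw hgw =>
          refine ⟨(w, path ++ [current]), List.mem_append.mpr (Or.inl ?_), hgw⟩
          rw [List.mem_reverse]
          exact List.mem_map.mpr ⟨w, hw, rfl⟩
      · exact ⟨e, List.mem_append.mpr (Or.inr he'), hg⟩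

-- ===== VERDICT (by name: the statement is the Claim_ definition above) =====
theorem has_full_priority0_lasso_spec : Claim_equal_has_full_priority0_lasso := by
  intro vertices edges _hdom hpre
  unfold Spec_has_full_priority0_lasso
  have hnd : (vertices.map Prod.fst).Nodup := hpre
  set X0 : PySem.Set String := PySem.Set.ofList (pvZero vertices) with hX0
  set F := pvLoopB edges X0 with hF
  have hfix : pvStep edges F = F := pvLoopB_fix edges X0 (PySem.Set.nodup_ofList _)
  have hFsub : ∀ x ∈ F, x ∈ pvZero vertices := fun x hx =>
    (PySem.Set.mem_ofList _ _).mp ((pvLoopB_sublist edges X0).subset hx)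
  have hBiff : has_full_priority0_lasso_alt vertices edges = true ↔ "v0" ∈ F := by
    have hrfl : has_full_priority0_lasso_alt vertices edges
        = (pvLoopB edges (PySem.Set.ofList (pvZero vertices))).contains "v0" := rfl
    rw [hrfl]
    simp [← hX0, ← hF]
  have hGoodIff : pvGood vertices edges "v0" [] ↔ "v0" ∈ F := by
    constructor
    · intro hg
      obtain ⟨S, hpost, hcov⟩ := pvGood_sound vertices edges "v0" [] hg (pvChain.nil "v0")
      refine pvPost_le_loopB vertices edges S hpost X0 ?_ "v0" (hcov _ (by simp))
      intro x hx
      exact (PySem.Set.mem_ofList _ _).mpr (pvMem_zero_of vertices x (hpost x hx).1)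
    · intro hv
      exact pvFix_good vertices edges hnd F hfix hFsub [] "v0" hv
  have hGood0 : pvGood vertices edges "v0" [] →
      PySem.Dict.getD (PySem.Dict.mk vertices) "v0" (-1) = 0 := by
    intro hg
    cases hg with
    | hit _ _ h0 _ => exact h0
    | step _ _ _ h0 _ _ _ => exact h0
  have hAiff : has_full_priority0_lasso vertices edges = true ↔
      pvGood vertices edges "v0" [] := by
    unfold has_full_priority0_lasso
    cases hg : PySem.Dict.get? (PySem.Dict.mk vertices) "v0" with
    | none =>
      simp only [Bool.false_eq_true, false_iff]
      intro hgood
      have h0 := hGood0 hgood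
      rw [PySem.Dict.getD_eq_get?_getD, hg] at h0
      simp at h0
    | some t =>
      show (if t ≠ 0 then false else pvLoopA vertices edges [("v0", [])]) = true ↔
        pvGood vertices edges "v0" []
      by_cases ht : t = 0
      · subst ht
        simp only [ne_eq, not_true_eq_false, if_false]
        rw [pvLoopA_iff]
        simp
      · rw [if_pos ht]
        simp only [Bool.false_eq_true, false_iff]
        intro hgood
        have h0 := hGood0 hgood
        rw [PySem.Dict.getD_eq_get?_getD, hg] at h0
        simp at h0
        exact ht h0
  cases hA : has_full_priority0_lasso vertices edges with
  | true =>
    have := hGoodIff.mp (hAiff.mp hA)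
    exact (hBiff.mpr this).symm
  | false =>
    cases hB : has_full_priority0_lasso_alt vertices edges with
    | true =>
      exfalso
      have hg := hGoodIff.mpr (hBiff.mp hB)
      have := hAiff.mpr hg
      rw [hA] at this
      simp at this
    | false => rfl
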